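-- pv_equiv track=rewrite | github.com/nateraw/stable-diffusion-videos | stable_diffusion_videos/image_generation.py | get_groups_of_n
-- ===== SOURCE A (Python) =====
-- def get_groups_of_n(n: int, iterator):
--     assert n > 1
--     buffer = []
--     for elt in iterator:
--         if len(buffer) == n:
--             yield buffer
--             buffer = []
--         buffer.append(elt)
--     if len(buffer) != 0:
--         yield buffer
-- ===== SOURCE B (Python) =====
-- from itertools import islice
--
-- def get_groups_of_n(n: int, iterator):
--     assert n > 1
--     it = iter(iterator)
--     while True:
--         group = list(islice(it, n))
--         if not group:
--             break
--         yield group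
-- ===== Notes on version B (the rewrite author's own statement) =====
-- stated objective: idiomatic
-- what changed: Replaces the element-by-element buffer accumulation with an itertools.islice loop that pulls each whole group of n at once and stops on the first empty slice.
import Mathlib
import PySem

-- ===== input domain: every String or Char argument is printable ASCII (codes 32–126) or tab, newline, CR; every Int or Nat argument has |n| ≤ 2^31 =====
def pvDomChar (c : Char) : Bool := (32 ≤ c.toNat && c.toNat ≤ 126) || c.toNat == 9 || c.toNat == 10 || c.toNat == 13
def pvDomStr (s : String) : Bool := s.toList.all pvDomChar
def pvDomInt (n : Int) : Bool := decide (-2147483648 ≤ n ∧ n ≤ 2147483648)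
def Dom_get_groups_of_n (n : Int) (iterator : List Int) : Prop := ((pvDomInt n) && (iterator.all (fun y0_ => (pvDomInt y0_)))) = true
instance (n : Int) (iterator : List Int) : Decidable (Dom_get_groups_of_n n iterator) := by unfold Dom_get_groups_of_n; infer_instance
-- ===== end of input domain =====

-- B replaces A's element-by-element buffer accumulation with an islice-style loop
-- that pulls a whole group of n at a time (idiomatic; same cost). Pre_ excludes
-- n ≤ 1, on which A raises AssertionError.


-- ===== PORT A =====
-- for elt in iterator: if len(buffer)==n: yield buffer; buffer=[]; buffer.append(elt)
-- state = (yielded groups so far, buffer); trailing `if len(buffer)!=0: yield buffer`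
def get_groups_of_n (n : Int) (iterator : List Int) : List (List Int) :=
  let s := iterator.foldl
    (fun (s : List (List Int) × List Int) elt =>
      if (s.2.length : Int) = n then (s.1 ++ [s.2], [elt]) else (s.1, s.2 ++ [elt]))
    ([], [])
  if s.2.length ≠ 0 then s.1 ++ [s.2] else s.1

-- ===== PORT B =====
-- while True: group = list(islice(it, n)); if not group: break; yield group
def get_groups_of_n_alt_go (n : Nat) (xs : List Int) : List (List Int) :=
  let group := xs.take n
  if h : group = [] then [] else group :: get_groups_of_n_alt_go n (xs.drop n)
termination_by xs.length
decreasing_by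
  simp only [List.length_drop]
  have hn : n ≠ 0 := by rintro rfl; simp [group] at h
  have hxs : xs ≠ [] := by rintro rfl; simp [group] at h
  have := List.length_pos_iff.mpr hxs
  omega

def get_groups_of_n_alt (n : Int) (iterator : List Int) : List (List Int) :=
  get_groups_of_n_alt_go n.toNat iterator

-- ===== PRECONDITION & SPEC =====
-- A asserts n > 1 (AssertionError otherwise); Pre_ admits exactly the inputs where A returns.
def Pre_get_groups_of_n (n : Int) (iterator : List Int) : Prop := 1 < n
instance (n : Int) (iterator : List Int) : Decidable (Pre_get_groups_of_n n iterator) := by unfold Pre_get_groups_of_n; infer_instance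
def pvWitness_get_groups_of_n : Int × List Int := (2, [1, 2, 3])

def Spec_get_groups_of_n (n : Int) (iterator : List Int) (out : List (List Int)) : Prop := out = get_groups_of_n_alt n iterator
instance (n : Int) (iterator : List Int) (out : List (List Int)) : Decidable (Spec_get_groups_of_n n iterator out) := by unfold Spec_get_groups_of_n; infer_instance

-- ===== CLAIM (what is proved, stated in full; the proofs are below) =====
def Claim_equal_get_groups_of_n : Prop := ∀ (n : Int) (iterator : List Int), Dom_get_groups_of_n n iterator → Pre_get_groups_of_n n iterator → Spec_get_groups_of_n n iterator (get_groups_of_n n iterator)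

-- ===== LEMMAS AND PROOFS =====

-- unfolding of B's loop on a nonempty list (n ≥ 1)
theorem alt_go_cons (n : Nat) (hn : 1 ≤ n) (x : Int) (rest : List Int) :
    get_groups_of_n_alt_go n (x :: rest)
      = (x :: rest.take (n - 1)) :: get_groups_of_n_alt_go n (rest.drop (n - 1)) := by
  rw [get_groups_of_n_alt_go]
  have h1 : (x :: rest).take n = x :: rest.take (n - 1) := by
    cases n with
    | zero => omega
    | succ m => simp
  have h2 : (x :: rest).drop n = rest.drop (n - 1) := by
    cases n with
    | zero => omega
    | succ m => simp
  simp [h1, h2]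

-- main invariant for A's fold: a nonempty buffer buf (of length ≤ n) together with
-- the remaining input xs produces group (buf ++ take (n - |buf|) xs) followed by
-- B's chunking of the rest, appended to the already-yielded groups out.
theorem fold_invariant (n : Nat) (hn : 2 ≤ n) :
    ∀ (xs : List Int) (out : List (List Int)) (buf : List Int),
    1 ≤ buf.length → buf.length ≤ n →
    (let s := xs.foldl
        (fun (s : List (List Int) × List Int) elt =>
          if (s.2.length : Int) = (n : Int) then (s.1 ++ [s.2], [elt]) else (s.1, s.2 ++ [elt]))
        (out, buf)
     if s.2.length ≠ 0 then s.1 ++ [s.2] else s.1)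
      = out ++ (buf ++ xs.take (n - buf.length)) :: get_groups_of_n_alt_go n (xs.drop (n - buf.length)) := by
  intro xs
  induction xs with
  | nil =>
    intro out buf h1 h2
    simp only [List.foldl_nil, List.take_nil, List.drop_nil, List.append_nil]
    rw [get_groups_of_n_alt_go]
    simp only [List.take_nil]
    have : buf.length ≠ 0 := by omega
    simp [this]
  | cons x rest ih =>
    intro out buf h1 h2
    simp only [List.foldl_cons]
    by_cases hfull : (buf.length : Int) = (n : Int)
    · have hlen : buf.length = n := by exact_mod_cast hfull
      simp only [hfull, if_true]
      rw [ih (out ++ [buf]) [x] (by simp) (by simp; omega)]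
      have : n - buf.length = 0 := by omega
      rw [this]
      simp only [List.take_zero, List.drop_zero, List.append_nil, List.append_assoc,
        List.singleton_append, List.cons_append, List.nil_append]
      rw [alt_go_cons n (by omega)]
      simp
    · have hlt : buf.length < n := by
        rcases lt_or_eq_of_le h2 with h | h
        · exact h
        · exact absurd (by exact_mod_cast h) hfull
      simp only [if_neg hfull]
      rw [ih out (buf ++ [x]) (by simp) (by simp only [List.length_append, List.length_cons, List.length_nil]; omega)]
      have ht : n - buf.length = (n - (buf ++ [x]).length) + 1 := by simp; omega
      rw [ht]
      simp [List.take_succ_cons, List.drop_succ_cons]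

-- ===== VERDICT (by name: the statement is the Claim_ definition above) =====
theorem get_groups_of_n_spec : Claim_equal_get_groups_of_n := by
  intro n iterator _ hpre
  unfold Spec_get_groups_of_n get_groups_of_n get_groups_of_n_alt
  have hn2 : 2 ≤ n.toNat := by
    unfold Pre_get_groups_of_n at hpre; omega
  have hcast : ((n.toNat : Nat) : Int) = n := by
    unfold Pre_get_groups_of_n at hpre; omega
  cases iterator with
  | nil =>
    rw [get_groups_of_n_alt_go]
    simp
  | cons x rest =>
    simp only [List.foldl_cons]
    have hne : ¬ ((([] : List Int).length : Int) = n) := by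
      unfold Pre_get_groups_of_n at hpre; simp; omega
    rw [if_neg hne]
    have := fold_invariant n.toNat hn2 rest [] [x] (by simp) (by simp; omega)
    simp only [hcast] at this
    simp only [List.nil_append] at this ⊢
    rw [this]
    rw [alt_go_cons n.toNat (by omega)]
    simp
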